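-- pv_equiv track=rewrite | github.com/NBO2001/UFAM---Atividades | IC/Atividades/Lista_dominor/src/unificada/__init__.py | m_mais_ponto
-- ===== SOURCE A (Python) =====
-- def joga_pedra(pedra, mesa, index):
--
--     valores_anteriores = mesa[:index]
--     if len(mesa) != index + 1:
--         valores_posteriores = mesa[(index + 1) :]
--     else:
--         valores_posteriores = ()
--
--     return (
--         valores_anteriores
--         + (ponta_que_entra(pedra, mesa[index]),)
--         + valores_posteriores
--     )
--
-- def suma(values):
--     if len(values) == 0:
--         return 0
--
--     return head(values) + suma(tail(values))
--
-- def head(lista_itens):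
--     if len(lista_itens) == 0:
--         return []
--     else:
--         return lista_itens[0]
--
-- def tail(lista_itens, position=1):
--     if len(lista_itens) == 0:
--         return []
--     else:
--         return lista_itens[position:]
--
-- def sum_pontas(pontas):
--     if len(pontas) == 0:
--         return 0
--     return suma(pontas[0]) + sum_pontas(pontas[1:])
--
-- def ponta_que_entra(pedra, ponta):
--     if pedra[0] == ponta[0] and pedra[0] != pedra[1]:
--         return [pedra[1]]
--     elif pedra[0] == ponta[0] and pedra[0] == pedra[1]:
--         return [pedra[0], pedra[1]]
--     else:
--         return [pedra[0]]
--
-- def find_indexs(lado_a, mesa):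
--     indece = []
--     for ind in range(0, len(mesa)):
--         if len(mesa[ind]) != 0 and lado_a == mesa[ind][0]:
--             indece.append(ind)
--
--     return indece
--
-- def m_mais_ponto(pedra, mesa):
--
--     indexs = find_indexs(pedra[0], mesa) + find_indexs(pedra[1], mesa)
--
--     maior_ponto = 0
--     maior_ponto_index = 0
--
--     for inx in indexs:
--         if maior_ponto <= sum_pontas(joga_pedra(pedra, mesa, inx)):
--             maior_ponto = sum_pontas(joga_pedra(pedra, mesa, inx))
--             maior_ponto_index = inx
--
--     return (maior_ponto, maior_ponto_index)
-- ===== SOURCE B (Python) =====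
-- def m_mais_ponto(pedra, mesa):
--     sums = [sum(r) for r in mesa]
--     total = sum(sums)
--     best, best_i = 0, 0
--     for lado in (pedra[0], pedra[1]):
--         for i, row in enumerate(mesa):
--             if row and row[0] == lado:
--                 if pedra[0] == row[0]:
--                     entra = pedra[0] + pedra[1] if pedra[0] == pedra[1] else pedra[1]
--                 else:
--                     entra = pedra[0]
--                 s = total - sums[i] + entra
--                 if best <= s:
--                     best, best_i = s, i
--     return (best, best_i)
-- ===== Notes on version B (the rewrite author's own statement) =====
-- stated objective: faster
-- what changed: B precomputes each row's sum and the whole-table total once and scores every candidate placement with an O(1) incremental update (total - row_sum + entering pips), instead of A's recursive re-summation of the entire rebuilt table for every candidate (done twice per candidate).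
import Mathlib
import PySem

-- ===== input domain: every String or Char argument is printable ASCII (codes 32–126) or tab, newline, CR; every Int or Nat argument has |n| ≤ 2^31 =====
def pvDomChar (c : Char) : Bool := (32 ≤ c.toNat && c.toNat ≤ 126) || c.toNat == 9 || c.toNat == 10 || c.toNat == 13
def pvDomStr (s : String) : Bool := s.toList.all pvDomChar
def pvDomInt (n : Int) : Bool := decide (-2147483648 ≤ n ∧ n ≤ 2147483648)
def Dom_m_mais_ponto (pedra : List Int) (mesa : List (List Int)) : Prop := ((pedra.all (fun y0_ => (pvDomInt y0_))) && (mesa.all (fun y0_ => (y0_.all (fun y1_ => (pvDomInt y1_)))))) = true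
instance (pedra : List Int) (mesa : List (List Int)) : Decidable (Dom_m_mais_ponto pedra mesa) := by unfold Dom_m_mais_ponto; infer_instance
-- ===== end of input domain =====

-- B replaces A's full re-summation of the rebuilt table for every candidate index
-- (twice per candidate) with one precomputed row-sum table and total and an O(1)
-- incremental score per candidate (objective: faster on large tables).

-- ===== PORT A =====
-- suma (recursive sum; head/tail inlined as the nonempty-list match)
def pvSuma : List Int → Int
  | [] => 0
  | h :: t => h + pvSuma t

-- sum_pontas
def pvSumPontas : List (List Int) → Int
  | [] => 0
  | h :: t => pvSuma h + pvSumPontas t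

-- ponta_que_entra; pedra[0] = headI, pedra[1] = getD 1: all calls A makes inside
-- Pre_ have 2 ≤ pedra.length and a nonempty ponta
def pvPontaQueEntra (pedra ponta : List Int) : List Int :=
  let p0 := pedra.headI
  let p1 := pedra.getD 1 0
  if p0 = ponta.headI ∧ p0 ≠ p1 then [p1]
  else if p0 = ponta.headI ∧ p0 = p1 then [p0, p1]
  else [p0]

-- joga_pedra (sequence concatenation of the two slices around the replaced entry)
def pvJogaPedra (pedra : List Int) (mesa : List (List Int)) (index : Int) : List (List Int) :=
  let valoresAnteriores := PySem.List.slice mesa none (some index)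
  let valoresPosteriores :=
    if (mesa.length : Int) ≠ index + 1 then PySem.List.slice mesa (some (index + 1)) none else []
  valoresAnteriores ++ [pvPontaQueEntra pedra ((PySem.List.pyGet? mesa index).getD [])] ++ valoresPosteriores

-- find_indexs
def pvFindIndexs (ladoA : Int) (mesa : List (List Int)) : List Int :=
  (PySem.List.pyRange 0 (mesa.length : Int) 1).foldl
    (fun indece ind =>
      let row := (PySem.List.pyGet? mesa ind).getD []
      if row.length ≠ 0 ∧ ladoA = row.headI then indece ++ [ind] else indece)
    []

def m_mais_ponto (pedra : List Int) (mesa : List (List Int)) : List Int :=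
  let p0 := pedra.headI          -- pedra[0]; exists under Pre_
  let p1 := pedra.getD 1 0       -- pedra[1]; exists under Pre_
  let indexs := pvFindIndexs p0 mesa ++ pvFindIndexs p1 mesa
  let r := indexs.foldl
    (fun (s : Int × Int) inx =>
      if s.1 ≤ pvSumPontas (pvJogaPedra pedra mesa inx) then
        (pvSumPontas (pvJogaPedra pedra mesa inx), inx)
      else s)
    (0, 0)
  [r.1, r.2]

-- ===== PORT B =====
def m_mais_ponto_alt (pedra : List Int) (mesa : List (List Int)) : List Int :=
  let sums := mesa.map List.sum
  let total := sums.sum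
  let p0 := pedra.headI          -- pedra[0]; exists under Pre_
  let p1 := pedra.getD 1 0       -- pedra[1]; exists under Pre_
  let r := [p0, p1].foldl
    (fun (s : Int × Int) lado =>
      (PySem.List.enumerate mesa).foldl
        (fun (s : Int × Int) pr =>
          if pr.2 ≠ [] ∧ pr.2.headI = lado then
            let entra := if p0 = pr.2.headI then (if p0 = p1 then p0 + p1 else p1) else p0
            let v := total - PySem.List.pyGetD sums pr.1 0 + entra
            if s.1 ≤ v then (v, pr.1) else s
          else s)
        s)
    (0, 0)
  [r.1, r.2]

-- ===== PRECONDITION & SPEC =====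
-- Pre_ excludes exactly the inputs where A raises: pedra shorter than 2
-- (pedra[0] / pedra[1] → IndexError).
def Pre_m_mais_ponto (pedra : List Int) (mesa : List (List Int)) : Prop :=
  2 ≤ pedra.length
instance (pedra : List Int) (mesa : List (List Int)) : Decidable (Pre_m_mais_ponto pedra mesa) := by unfold Pre_m_mais_ponto; infer_instance

def pvWitness_m_mais_ponto : List Int × List (List Int) := ([1, 2], [[3, 4], []])

def Spec_m_mais_ponto (pedra : List Int) (mesa : List (List Int)) (out : List Int) : Prop := out = m_mais_ponto_alt pedra mesa
instance (pedra : List Int) (mesa : List (List Int)) (out : List Int) : Decidable (Spec_m_mais_ponto pedra mesa out) := by unfold Spec_m_mais_ponto; infer_instance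

-- ===== CLAIM (what is proved, stated in full; the proofs are below) =====
def Claim_equal_m_mais_ponto : Prop := ∀ (pedra : List Int) (mesa : List (List Int)), Dom_m_mais_ponto pedra mesa → Pre_m_mais_ponto pedra mesa → Spec_m_mais_ponto pedra mesa (m_mais_ponto pedra mesa)

-- ===== LEMMAS AND PROOFS =====

theorem pvSuma_eq_sum (l : List Int) : pvSuma l = l.sum := by
  induction l with
  | nil => rfl
  | cons h t ih => simp [pvSuma, ih]

theorem pvSumPontas_eq (l : List (List Int)) : pvSumPontas l = (l.map List.sum).sum := by
  induction l with
  | nil => rfl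
  | cons h t ih => simp [pvSumPontas, ih, pvSuma_eq_sum]

-- the pip value the played stone contributes, as B computes it
theorem pvPontaQueEntra_sum (pedra row : List Int) :
    pvSuma (pvPontaQueEntra pedra row) =
      (if pedra.headI = row.headI then
        (if pedra.headI = pedra.getD 1 0 then pedra.headI + pedra.getD 1 0 else pedra.getD 1 0)
      else pedra.headI) := by
  unfold pvPontaQueEntra
  by_cases h0 : pedra.headI = row.headI
  · by_cases h1 : pedra.headI = pedra.getD 1 0
    · rw [if_neg (fun h => h.2 h1), if_pos ⟨h0, h1⟩, if_pos h0, if_pos h1]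
      simp [pvSuma]
    · rw [if_pos ⟨h0, h1⟩, if_pos h0, if_neg h1]
      simp [pvSuma]
  · rw [if_neg (fun h => h0 h.1), if_neg (fun h => h0 h.1), if_neg h0]
    simp [pvSuma]

-- joga_pedra at an in-range index is the table with entry k replaced
theorem pvJogaPedra_eq (pedra : List Int) (mesa : List (List Int)) (k : Nat)
    (hk : k < mesa.length) :
    pvJogaPedra pedra mesa (k : Int) =
      mesa.take k ++ pvPontaQueEntra pedra mesa[k] :: mesa.drop (k + 1) := by
  unfold pvJogaPedra
  have hget : (PySem.List.pyGet? mesa (k : Int)).getD [] = mesa[k] := by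
    simp [PySem.List.pyGet?, PySem.List.pyIdx?, hk]
  rw [hget, PySem.List.slice_to_natCast]
  by_cases hlast : (mesa.length : Int) = (k : Int) + 1
  · have hdrop : mesa.drop (k + 1) = [] := by
      apply List.drop_eq_nil_of_le; omega
    simp [hlast, hdrop]
  · have hcast : ((k : Int) + 1) = ((k + 1 : Nat) : Int) := by push_cast; ring
    rw [if_pos hlast, hcast, PySem.List.slice_from_natCast]
    simp

-- the score A recomputes from scratch equals B's incremental one
theorem pvScore_eq (pedra : List Int) (mesa : List (List Int)) (k : Nat)
    (hk : k < mesa.length) :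
    pvSumPontas (pvJogaPedra pedra mesa (k : Int)) =
      (mesa.map List.sum).sum - mesa[k].sum + pvSuma (pvPontaQueEntra pedra mesa[k]) := by
  have hsplit : mesa = mesa.take k ++ mesa[k] :: mesa.drop (k + 1) := by
    conv_lhs => rw [← List.take_append_drop k mesa]
    rw [List.drop_eq_getElem_cons hk]
  have htot : (mesa.map List.sum).sum =
      ((mesa.take k).map List.sum).sum + mesa[k].sum + ((mesa.drop (k + 1)).map List.sum).sum := by
    conv_lhs => rw [hsplit]
    rw [List.map_append, List.sum_append, List.map_cons, List.sum_cons]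
    ring
  rw [pvJogaPedra_eq pedra mesa k hk, pvSumPontas_eq]
  simp only [List.map_append, List.sum_append, List.map_cons, List.sum_cons, pvSuma_eq_sum]
  linarith [htot]

-- find_indexs is the first components of the enumerate pairs B filters
theorem pvFindIndexs_eq_filter (lado : Int) (mesa : List (List Int)) :
    pvFindIndexs lado mesa =
      ((PySem.List.enumerate mesa).filter
        (fun pr => decide (pr.2 ≠ [] ∧ pr.2.headI = lado))).map (·.1) := by
  unfold pvFindIndexs
  rw [PySem.List.foldl_append_ite_eq_filter
    (fun ind => ((PySem.List.pyGet? mesa ind).getD []).length ≠ 0 ∧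
                 lado = ((PySem.List.pyGet? mesa ind).getD []).headI)]
  rw [PySem.List.enumerate_eq_map_pyRange (d := []), List.filter_map, List.map_map]
  have hmapid : ((fun pr : Int × List Int => pr.1) ∘
      (fun j => (j, PySem.List.pyGetD mesa j []))) = id := rfl
  rw [hmapid, List.map_id, List.nil_append]
  apply List.filter_congr
  intro x _
  simp only [Function.comp_apply]
  have hgd : (PySem.List.pyGet? mesa x).getD [] = PySem.List.pyGetD mesa x [] := by
    simp [PySem.List.pyGetD, PySem.List.pyGet?]
  rw [hgd, decide_eq_decide]
  constructor
  · rintro ⟨a, b⟩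
    exact ⟨by simpa [← List.length_eq_zero_iff] using a, b.symm⟩
  · rintro ⟨a, b⟩
    exact ⟨by simpa [← List.length_eq_zero_iff] using a, b.symm⟩

-- one lado of A's candidate loop is B's inner loop over the enumerated table
theorem pvLado_fold_eq (pedra : List Int) (mesa : List (List Int)) (lado : Int)
    (s : Int × Int) :
    (pvFindIndexs lado mesa).foldl
      (fun (s : Int × Int) inx =>
        if s.1 ≤ pvSumPontas (pvJogaPedra pedra mesa inx) then
          (pvSumPontas (pvJogaPedra pedra mesa inx), inx)
        else s) s =
    (PySem.List.enumerate mesa).foldl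
      (fun (s : Int × Int) pr =>
        if pr.2 ≠ [] ∧ pr.2.headI = lado then
          let entra := if pedra.headI = pr.2.headI then
            (if pedra.headI = pedra.getD 1 0 then pedra.headI + pedra.getD 1 0 else pedra.getD 1 0)
          else pedra.headI
          let v := (mesa.map List.sum).sum - PySem.List.pyGetD (mesa.map List.sum) pr.1 0 + entra
          if s.1 ≤ v then (v, pr.1) else s
        else s) s := by
  rw [pvFindIndexs_eq_filter, List.foldl_map,
    ← PySem.List.foldl_ite_eq_foldl_filter
      (p := fun pr : Int × List Int => pr.2 ≠ [] ∧ pr.2.headI = lado)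
      (f := fun (s : Int × Int) (pr : Int × List Int) =>
        if s.1 ≤ pvSumPontas (pvJogaPedra pedra mesa pr.1) then
          (pvSumPontas (pvJogaPedra pedra mesa pr.1), pr.1)
        else s)]
  apply PySem.List.foldl_congr_mem
  intro acc pr hpr
  rcases (PySem.List.mem_enumerate_iff _ _ _).1 hpr with ⟨k, hk, hpr⟩
  subst hpr
  simp only [zero_add]
  by_cases hc : mesa[k] ≠ [] ∧ mesa[k].headI = lado
  · have hg : PySem.List.pyGetD (mesa.map List.sum) (k : Int) 0 = mesa[k].sum := by
      rw [PySem.List.pyGetD_eq_getElem (mesa.map List.sum) 0 (Int.natCast_nonneg k)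
        (by simpa using (by exact_mod_cast hk : (k : Int) < (mesa.length : Int)))]
      simp
    have hv : pvSumPontas (pvJogaPedra pedra mesa (k : Int)) =
        (mesa.map List.sum).sum - PySem.List.pyGetD (mesa.map List.sum) (k : Int) 0 +
          (if pedra.headI = (mesa[k]).headI then
            (if pedra.headI = pedra.getD 1 0 then pedra.headI + pedra.getD 1 0 else pedra.getD 1 0)
          else pedra.headI) := by
      rw [pvScore_eq pedra mesa k hk, pvPontaQueEntra_sum, hg]
    rw [if_pos hc, if_pos hc, hv]
  · rw [if_neg hc, if_neg hc]

-- ===== VERDICT (by name: the statement is the Claim_ definition above) =====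
theorem m_mais_ponto_spec : Claim_equal_m_mais_ponto := by
  intro pedra mesa _hdom _hpre
  unfold Spec_m_mais_ponto m_mais_ponto m_mais_ponto_alt
  simp only [List.foldl_append, List.foldl_cons, List.foldl_nil]
  rw [pvLado_fold_eq pedra mesa pedra.headI (0, 0),
    pvLado_fold_eq pedra mesa (pedra.getD 1 0)]
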